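-- pv_equiv track=rewrite | github.com/sauravbhattacharya001/VoronoiMap | vormap_jigsaw.py | _region_bboxes
-- ===== SOURCE A (Python) =====
-- from typing import List, Tuple, Optional, Dict
--
-- def _region_bboxes(grid, width: int, height: int,
--                    n_regions: int) -> Dict[int, Tuple[int, int, int, int]]:
--     """Return {region_id: (min_x, min_y, max_x, max_y)}."""
--     bboxes: Dict[int, list] = {}
--     for y in range(height):
--         for x in range(width):
--             r = grid[y][x] if isinstance(grid, list) else int(grid[y, x])
--             if r not in bboxes:
--                 bboxes[r] = [x, y, x, y]
--             else:
--                 bb = bboxes[r]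
--                 if x < bb[0]: bb[0] = x
--                 if y < bb[1]: bb[1] = y
--                 if x > bb[2]: bb[2] = x
--                 if y > bb[3]: bb[3] = y
--     return {k: tuple(v) for k, v in bboxes.items()}
-- ===== SOURCE B (Python) =====
-- from typing import Dict, Tuple
--
-- def _region_bboxes(grid, width: int, height: int,
--                    n_regions: int) -> Dict[int, Tuple[int, int, int, int]]:
--     """Return {region_id: (min_x, min_y, max_x, max_y)} via group-then-reduce."""
--     coords: Dict[int, list] = {}
--     for y in range(height):
--         for x in range(width):
--             r = grid[y][x] if isinstance(grid, list) else int(grid[y, x])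
--             coords.setdefault(r, []).append((x, y))
--     out = {}
--     for r, pts in coords.items():
--         xs = [p[0] for p in pts]
--         ys = [p[1] for p in pts]
--         out[r] = (min(xs), min(ys), max(xs), max(ys))
--     return out
-- ===== Notes on version B (the rewrite author's own statement) =====
-- stated objective: alternative
-- what changed: A updates a per-region bounding box incrementally with four comparison branches at every cell; B first groups all cell coordinates by region id in one pass and then reduces each group with min/max in a second pass.
import Mathlib
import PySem

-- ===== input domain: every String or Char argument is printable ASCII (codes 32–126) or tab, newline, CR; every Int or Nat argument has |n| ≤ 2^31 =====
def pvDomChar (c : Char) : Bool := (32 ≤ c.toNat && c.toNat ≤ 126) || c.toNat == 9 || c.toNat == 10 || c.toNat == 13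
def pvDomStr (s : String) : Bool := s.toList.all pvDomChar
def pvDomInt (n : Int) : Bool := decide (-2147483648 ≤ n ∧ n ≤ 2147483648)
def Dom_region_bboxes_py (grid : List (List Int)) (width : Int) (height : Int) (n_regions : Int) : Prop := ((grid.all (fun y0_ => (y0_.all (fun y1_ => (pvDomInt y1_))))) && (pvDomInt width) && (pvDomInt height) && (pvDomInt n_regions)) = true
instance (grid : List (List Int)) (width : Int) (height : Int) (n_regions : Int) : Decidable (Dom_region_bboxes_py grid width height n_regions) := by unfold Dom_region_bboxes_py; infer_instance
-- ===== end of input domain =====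

-- B replaces A's incremental four-branch min/max updates by a group-coordinates-then-reduce
-- decomposition (same asymptotic cost); equivalence is about the return value.

-- ===== PORT A =====
-- Python's 4-element list [x, y, x, y] is ported as a 4-tuple updated componentwise;
-- under the type convention 'grid' is always a list, so the isinstance test selects
-- grid[y][x]; out-of-range reads (Python IndexError) are excluded by Pre_ (defaulted here).
def region_bboxes_py (grid : List (List Int)) (width : Int) (height : Int) (n_regions : Int) : List (Int × Int × Int × Int × Int) :=
  let bboxes : PySem.Dict Int (Int × Int × Int × Int) :=
    (PySem.List.pyRange 0 height 1).foldl (fun bboxes y =>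
      (PySem.List.pyRange 0 width 1).foldl (fun bboxes x =>
        let r : Int := PySem.List.pyGetD (PySem.List.pyGetD grid y []) x 0
        if !bboxes.contains r then
          bboxes.insert r (x, y, x, y)
        else
          let bb := bboxes.getD r (0, 0, 0, 0)
          bboxes.insert r
            (if x < bb.1 then x else bb.1,
             if y < bb.2.1 then y else bb.2.1,
             if x > bb.2.2.1 then x else bb.2.2.1,
             if y > bb.2.2.2 then y else bb.2.2.2)) bboxes) PySem.Dict.empty
  bboxes.items.map (fun kv => (kv.1, kv.2))

-- ===== PORT B =====
-- pass 1: coords.setdefault(r, []).append((x, y)); pass 2: bbox = (min xs, min ys, max xs, max ys).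
-- min/max of a nonempty Python list ported as min?/max? with a default never reached.
def region_bboxes_py_alt (grid : List (List Int)) (width : Int) (height : Int) (n_regions : Int) : List (Int × Int × Int × Int × Int) :=
  let coords : PySem.Dict Int (List (Int × Int)) :=
    (PySem.List.pyRange 0 height 1).foldl (fun coords y =>
      (PySem.List.pyRange 0 width 1).foldl (fun coords x =>
        let r : Int := PySem.List.pyGetD (PySem.List.pyGetD grid y []) x 0
        coords.modify r [] (fun pts => pts ++ [(x, y)])) coords) PySem.Dict.empty
  coords.items.map (fun rp =>
    let xs := rp.2.map (fun p => p.1)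
    let ys := rp.2.map (fun p => p.2)
    (rp.1,
     (PySem.List.min? xs (fun v => v)).getD 0,
     (PySem.List.min? ys (fun v => v)).getD 0,
     (PySem.List.max? xs (fun v => v)).getD 0,
     (PySem.List.max? ys (fun v => v)).getD 0))

-- ===== PRECONDITION & SPEC =====
-- Pre_ excludes exactly the inputs where Python A raises IndexError: whenever both loops
-- run, the first 'height' rows must exist and each must be at least 'width' wide.
def Pre_region_bboxes_py (grid : List (List Int)) (width : Int) (height : Int) (n_regions : Int) : Prop :=
  0 < width → 0 < height →
    height ≤ (grid.length : Int) ∧ ∀ row ∈ grid.take height.toNat, width ≤ (row.length : Int)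
instance (grid : List (List Int)) (width : Int) (height : Int) (n_regions : Int) : Decidable (Pre_region_bboxes_py grid width height n_regions) := by unfold Pre_region_bboxes_py; infer_instance

def pvWitness_region_bboxes_py : List (List Int) × Int × Int × Int := ([[0, 1], [1, 1]], 2, 2, 2)

def Spec_region_bboxes_py (grid : List (List Int)) (width : Int) (height : Int) (n_regions : Int) (out : List (Int × Int × Int × Int × Int)) : Prop := out = region_bboxes_py_alt grid width height n_regions
instance (grid : List (List Int)) (width : Int) (height : Int) (n_regions : Int) (out : List (Int × Int × Int × Int × Int)) : Decidable (Spec_region_bboxes_py grid width height n_regions out) := by unfold Spec_region_bboxes_py; infer_instance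

-- ===== CLAIM (what is proved, stated in full; the proofs are below) =====
def Claim_equal_region_bboxes_py : Prop := ∀ (grid : List (List Int)) (width : Int) (height : Int) (n_regions : Int), Dom_region_bboxes_py grid width height n_regions → Pre_region_bboxes_py grid width height n_regions → Spec_region_bboxes_py grid width height n_regions (region_bboxes_py grid width height n_regions)

-- ===== LEMMAS AND PROOFS =====

-- the common bbox step and the reduction of a coordinate group
def pvStep4 (bb : Int × Int × Int × Int) (c : Int × Int) : Int × Int × Int × Int :=
  (min bb.1 c.1, min bb.2.1 c.2, max bb.2.2.1 c.1, max bb.2.2.2 c.2)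

def pvRed : List (Int × Int) → Int × Int × Int × Int
  | [] => (0, 0, 0, 0)
  | c :: rest => rest.foldl pvStep4 (c.1, c.2, c.1, c.2)

-- the two loop bodies, as functions of the cell (x, y)
def pvStepA (grid : List (List Int)) (d : PySem.Dict Int (Int × Int × Int × Int)) (c : Int × Int) : PySem.Dict Int (Int × Int × Int × Int) :=
  let r : Int := PySem.List.pyGetD (PySem.List.pyGetD grid c.2 []) c.1 0
  if !d.contains r then
    d.insert r (c.1, c.2, c.1, c.2)
  else
    let bb := d.getD r (0, 0, 0, 0)
    d.insert r
      (if c.1 < bb.1 then c.1 else bb.1,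
       if c.2 < bb.2.1 then c.2 else bb.2.1,
       if c.1 > bb.2.2.1 then c.1 else bb.2.2.1,
       if c.2 > bb.2.2.2 then c.2 else bb.2.2.2)

def pvStepB (grid : List (List Int)) (d : PySem.Dict Int (List (Int × Int))) (c : Int × Int) : PySem.Dict Int (List (Int × Int)) :=
  let r : Int := PySem.List.pyGetD (PySem.List.pyGetD grid c.2 []) c.1 0
  d.modify r [] (fun pts => pts ++ [(c.1, c.2)])

def pvCells (width height : Int) : List (Int × Int) :=
  (PySem.List.pyRange 0 height 1).flatMap (fun y => (PySem.List.pyRange 0 width 1).map (fun x => (x, y)))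

lemma pvFoldl_flatMap {σ β γ : Type} (l : List β) (g : β → List γ) (f : σ → γ → σ) (init : σ) :
    l.foldl (fun d y => (g y).foldl f d) init = (l.flatMap g).foldl f init := by
  induction l generalizing init with
  | nil => rfl
  | cons b t ih => simp [List.foldl_append, ih]

lemma pvA_eq_cells (grid : List (List Int)) (width height n_regions : Int) :
    region_bboxes_py grid width height n_regions
      = ((pvCells width height).foldl (pvStepA grid) PySem.Dict.empty).items.map (fun kv => (kv.1, kv.2)) := by
  simp only [region_bboxes_py, pvCells]
  rw [← pvFoldl_flatMap]
  simp only [List.foldl_map]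
  rfl

lemma pvB_eq_cells (grid : List (List Int)) (width height n_regions : Int) :
    region_bboxes_py_alt grid width height n_regions
      = ((pvCells width height).foldl (pvStepB grid) PySem.Dict.empty).items.map (fun rp =>
          (rp.1,
           (PySem.List.min? (rp.2.map (fun p => p.1)) (fun v => v)).getD 0,
           (PySem.List.min? (rp.2.map (fun p => p.2)) (fun v => v)).getD 0,
           (PySem.List.max? (rp.2.map (fun p => p.1)) (fun v => v)).getD 0,
           (PySem.List.max? (rp.2.map (fun p => p.2)) (fun v => v)).getD 0)) := by
  simp only [region_bboxes_py_alt, pvCells]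
  rw [← pvFoldl_flatMap]
  simp only [List.foldl_map]
  rfl

def pvInv (dA : PySem.Dict Int (Int × Int × Int × Int)) (dB : PySem.Dict Int (List (Int × Int))) : Prop :=
  dA.items = dB.items.map (fun p => (p.1, pvRed p.2)) ∧ ∀ p ∈ dB.items, p.2 ≠ []

lemma pvGet?_red (l : List (Int × List (Int × Int))) (r : Int) :
    (PySem.Dict.mk (l.map (fun p => (p.1, pvRed p.2)))).get? r
      = ((PySem.Dict.mk l).get? r).map pvRed := by
  induction l with
  | nil => rfl
  | cons p t ih =>
    rw [List.map_cons, PySem.Dict.get?_mk_cons, PySem.Dict.get?_mk_cons]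
    by_cases h : (p.1 == r) = true
    · rw [if_pos h, if_pos h]; rfl
    · rw [if_neg h, if_neg h]; exact ih

lemma pvGet?_of_inv {dA : PySem.Dict Int (Int × Int × Int × Int)} {dB : PySem.Dict Int (List (Int × Int))}
    (h : pvInv dA dB) (r : Int) : dA.get? r = (dB.get? r).map pvRed := by
  have hA : dA = PySem.Dict.mk (dB.items.map (fun p => (p.1, pvRed p.2))) :=
    PySem.Dict.ext h.1
  rw [hA, pvGet?_red]

lemma pvContains_of_inv {dA : PySem.Dict Int (Int × Int × Int × Int)} {dB : PySem.Dict Int (List (Int × Int))}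
    (h : pvInv dA dB) (r : Int) : dA.contains r = dB.contains r := by
  rw [PySem.Dict.contains_eq_isSome_get?, PySem.Dict.contains_eq_isSome_get?, pvGet?_of_inv h]
  cases dB.get? r <;> rfl

lemma pvRed_append (pts : List (Int × Int)) (h : pts ≠ []) (c : Int × Int) :
    pvRed (pts ++ [c]) = pvStep4 (pvRed pts) c := by
  cases pts with
  | nil => exact absurd rfl h
  | cons q rest => simp [pvRed, List.foldl_append]

lemma pvStep4_eq_ifs (bb : Int × Int × Int × Int) (c : Int × Int) :
    (if c.1 < bb.1 then c.1 else bb.1,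
     if c.2 < bb.2.1 then c.2 else bb.2.1,
     if c.1 > bb.2.2.1 then c.1 else bb.2.2.1,
     if c.2 > bb.2.2.2 then c.2 else bb.2.2.2) = pvStep4 bb c := by
  unfold pvStep4
  refine Prod.ext ?_ (Prod.ext ?_ (Prod.ext ?_ ?_)) <;> simp <;> omega

lemma pvInv_step (grid : List (List Int)) (c : Int × Int)
    {dA : PySem.Dict Int (Int × Int × Int × Int)} {dB : PySem.Dict Int (List (Int × Int))}
    (h : pvInv dA dB) : pvInv (pvStepA grid dA c) (pvStepB grid dB c) := by
  obtain ⟨h1, h2⟩ := h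
  set r : Int := PySem.List.pyGetD (PySem.List.pyGetD grid c.2 []) c.1 0 with hr
  have hcont := pvContains_of_inv ⟨h1, h2⟩ r
  cases hb : dB.contains r with
  | false =>
    have hA : dA.contains r = false := by rw [hcont, hb]
    have hgd : dB.getD r [] = [] := PySem.Dict.getD_of_not_contains dB [] hb
    have hAstep : pvStepA grid dA c = dA.insert r (c.1, c.2, c.1, c.2) := by
      simp [pvStepA, ← hr, hA]
    have hBstep : pvStepB grid dB c = dB.insert r [(c.1, c.2)] := by
      show dB.insert r (dB.getD r [] ++ [(c.1, c.2)]) = _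
      rw [hgd]; rfl
    constructor
    · rw [hAstep, hBstep,
          PySem.Dict.items_insert_of_not_contains dA _ hA,
          PySem.Dict.items_insert_of_not_contains dB _ hb]
      simp [h1, pvRed]
    · intro p hp
      rw [hBstep, PySem.Dict.items_insert_of_not_contains dB _ hb] at hp
      rcases List.mem_append.mp hp with hm | hm
      · exact h2 p hm
      · simp at hm; subst hm; simp
  | true =>
    have hA : dA.contains r = true := by rw [hcont, hb]
    have hsome : (dB.get? r).isSome := by rw [← PySem.Dict.contains_eq_isSome_get?, hb]
    obtain ⟨pts, hpts⟩ := Option.isSome_iff_exists.mp hsome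
    have hmem : (r, pts) ∈ dB.items := PySem.Dict.mem_items_of_get?_eq_some dB hpts
    have hne : pts ≠ [] := h2 (r, pts) hmem
    have hgdB : dB.getD r [] = pts := PySem.Dict.getD_of_get?_eq_some dB [] hpts
    have hgdA : dA.getD r (0, 0, 0, 0) = pvRed pts := by
      rw [PySem.Dict.getD_eq_get?_getD, pvGet?_of_inv ⟨h1, h2⟩ r, hpts]; rfl
    have hAstep : pvStepA grid dA c = dA.insert r (pvStep4 (pvRed pts) c) := by
      simp only [pvStepA, ← hr, hA, Bool.not_true, Bool.false_eq_true, if_false, hgdA,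
        pvStep4_eq_ifs]
    have hBstep : pvStepB grid dB c = dB.insert r (pts ++ [(c.1, c.2)]) := by
      show dB.insert r (dB.getD r [] ++ [(c.1, c.2)]) = _
      rw [hgdB]
    constructor
    · rw [hAstep, hBstep,
          PySem.Dict.items_insert_of_contains dA _ hA,
          PySem.Dict.items_insert_of_contains dB _ hb, h1]
      rw [List.map_map, List.map_map]
      apply List.map_congr_left
      intro p _
      by_cases hpr : (p.1 == r) = true
      · simp [Function.comp, hpr, pvRed_append pts hne c]
      · simp [Function.comp, hpr]
    · intro p hp
      rw [hBstep, PySem.Dict.items_insert_of_contains dB _ hb] at hp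
      obtain ⟨q, hq, hqe⟩ := List.mem_map.mp hp
      by_cases hqr : (q.1 == r) = true
      · rw [if_pos hqr] at hqe; subst hqe; simp [hne]
      · rw [if_neg hqr] at hqe; subst hqe; exact h2 q hq
lemma pvInv_foldl (grid : List (List Int)) (cells : List (Int × Int))
    (dA : PySem.Dict Int (Int × Int × Int × Int)) (dB : PySem.Dict Int (List (Int × Int)))
    (h : pvInv dA dB) : pvInv (cells.foldl (pvStepA grid) dA) (cells.foldl (pvStepB grid) dB) := by
  induction cells generalizing dA dB with
  | nil => exact h
  | cons c t ih => exact ih _ _ (pvInv_step grid c h)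

lemma pvRed_components (rest : List (Int × Int)) :
    ∀ a b cc dd : Int, rest.foldl pvStep4 (a, b, cc, dd)
      = ((rest.map (fun p => p.1)).foldl min a, (rest.map (fun p => p.2)).foldl min b,
         (rest.map (fun p => p.1)).foldl max cc, (rest.map (fun p => p.2)).foldl max dd) := by
  induction rest with
  | nil => intro a b cc dd; rfl
  | cons q t ih => intro a b cc dd; simp [pvStep4, ih]

lemma pvMins_eq (pts : List (Int × Int)) (h : pts ≠ []) :
    ((PySem.List.min? (pts.map (fun p => p.1)) (fun v => v)).getD 0,
     (PySem.List.min? (pts.map (fun p => p.2)) (fun v => v)).getD 0,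
     (PySem.List.max? (pts.map (fun p => p.1)) (fun v => v)).getD 0,
     (PySem.List.max? (pts.map (fun p => p.2)) (fun v => v)).getD 0) = pvRed pts := by
  cases pts with
  | nil => exact absurd rfl h
  | cons c rest =>
    simp only [List.map_cons, PySem.List.min?_id_cons, PySem.List.max?_id_cons, pvRed,
      Option.getD_some, pvRed_components, List.foldl_map]

-- ===== VERDICT (by name: the statement is the Claim_ definition above) =====
theorem region_bboxes_py_spec : Claim_equal_region_bboxes_py := by
  intro grid width height n_regions _ _
  show region_bboxes_py grid width height n_regions = region_bboxes_py_alt grid width height n_regions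
  rw [pvA_eq_cells grid width height n_regions, pvB_eq_cells grid width height n_regions]
  have hinv := pvInv_foldl grid (pvCells width height) PySem.Dict.empty PySem.Dict.empty ⟨rfl, by intro p hp; cases hp⟩
  obtain ⟨h1, h2⟩ := hinv
  rw [h1, List.map_map]
  apply List.map_congr_left
  intro p hp
  have hne := h2 p hp
  simp only [Function.comp]
  rw [pvMins_eq p.2 hne]
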